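-- pv_equiv track=rewrite | github.com/kevinyang372/algorithm-studies | bloomberg/order_based_on_another_string.py | checkOrder
-- ===== SOURCE A (Python) =====
-- def checkOrder(base, arr):
--
--     d = {}
--     count = 0
--     for i in base:
--         d[i] = count
--         count += 1
--
--     cur = 0
--     for m in arr:
--         if m in d:
--             if d[m] < cur:
--                 return False
--             cur = d[m]
--
--     return True
-- ===== SOURCE B (Python) =====
-- def checkOrder(base, arr):
--     d = {c: i for i, c in enumerate(base)}
--     filtered = [d[m] for m in arr if m in d]
--     return filtered == sorted(filtered)
-- ===== Notes on version B (the rewrite author's own statement) =====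
-- stated objective: idiomatic
-- what changed: Replaces A's fused running-max scan with the idiomatic sort-and-compare check: build the list of base-indices of arr's in-base elements and compare it with its sorted copy.
import Mathlib
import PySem

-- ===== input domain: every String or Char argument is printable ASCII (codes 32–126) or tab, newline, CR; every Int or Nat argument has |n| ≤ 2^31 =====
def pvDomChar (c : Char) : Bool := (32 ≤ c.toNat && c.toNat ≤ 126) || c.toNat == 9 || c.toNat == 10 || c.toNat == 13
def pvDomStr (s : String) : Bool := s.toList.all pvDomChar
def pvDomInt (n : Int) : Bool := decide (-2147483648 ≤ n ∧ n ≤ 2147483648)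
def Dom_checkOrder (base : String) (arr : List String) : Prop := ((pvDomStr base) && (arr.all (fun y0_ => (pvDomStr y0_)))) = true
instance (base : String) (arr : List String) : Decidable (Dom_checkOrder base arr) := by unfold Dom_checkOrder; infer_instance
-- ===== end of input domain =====

-- B replaces A's fused running-max scan by the idiomatic sort-and-compare is-sorted check
-- on the list of base-indices of arr's in-base elements (return value only; same cost class).

-- ===== PORT A =====
-- d = {}; count = 0; for i in base: d[i] = count; count += 1
def pvBuildD (base : String) : PySem.Dict String Int :=
  (base.toList.foldl
    (fun (p : PySem.Dict String Int × Int) i => (p.1.insert (String.mk [i]) p.2, p.2 + 1))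
    (PySem.Dict.empty, 0)).1

-- cur = 0; for m in arr: if m in d: (if d[m] < cur: return False); cur = d[m]
def pvScanA (d : PySem.Dict String Int) : List String → Int → Bool
  | [], _ => true
  | m :: rest, cur =>
    match d.get? m with
    | some v => if v < cur then false else pvScanA d rest v
    | none => pvScanA d rest cur

def checkOrder (base : String) (arr : List String) : Bool :=
  pvScanA (pvBuildD base) arr 0

-- ===== PORT B =====
-- d = {c: i for i, c in enumerate(base)}
def pvBuildDAlt (base : String) : PySem.Dict String Int :=
  (PySem.List.enumerate base.toList).foldl
    (fun d p => d.insert (String.mk [p.2]) p.1) PySem.Dict.empty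

-- filtered = [d[m] for m in arr if m in d]; return filtered == sorted(filtered)
def checkOrder_alt (base : String) (arr : List String) : Bool :=
  let d := pvBuildDAlt base
  let filtered := arr.filterMap (fun m => d.get? m)
  filtered == PySem.List.sorted filtered (fun x => x) false

-- ===== PRECONDITION & SPEC =====
def Spec_checkOrder (base : String) (arr : List String) (out : Bool) : Prop := out = checkOrder_alt base arr
instance (base : String) (arr : List String) (out : Bool) : Decidable (Spec_checkOrder base arr out) := by unfold Spec_checkOrder; infer_instance

-- ===== CLAIM (what is proved, stated in full; the proofs are below) =====
def Claim_equal_checkOrder : Prop := ∀ (base : String) (arr : List String), Dom_checkOrder base arr → Spec_checkOrder base arr (checkOrder base arr)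

-- ===== LEMMAS AND PROOFS =====

-- the two dict-building loops agree
theorem buildD_fold_eq (cs : List Char) (d : PySem.Dict String Int) (c : Int) :
    (cs.foldl (fun (p : PySem.Dict String Int × Int) i => (p.1.insert (String.mk [i]) p.2, p.2 + 1)) (d, c)).1
      = (PySem.List.enumerate cs c).foldl (fun d p => d.insert (String.mk [p.2]) p.1) d := by
  induction cs generalizing d c with
  | nil => simp [PySem.List.enumerate_nil]
  | cons x xs ih => simp [PySem.List.enumerate_cons, List.foldl_cons, ih]

theorem buildDAlt_eq (base : String) : pvBuildDAlt base = pvBuildD base := by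
  unfold pvBuildDAlt pvBuildD
  exact (buildD_fold_eq base.toList PySem.Dict.empty 0).symm

-- all values stored by A's building loop are ≥ the running-counter lower bound
theorem buildD_nonneg_aux (cs : List Char) (d : PySem.Dict String Int) (c : Int)
    (hd : ∀ k v, d.get? k = some v → 0 ≤ v) (hc : 0 ≤ c) :
    ∀ k v, ((cs.foldl (fun (p : PySem.Dict String Int × Int) i => (p.1.insert (String.mk [i]) p.2, p.2 + 1)) (d, c)).1).get? k = some v → 0 ≤ v := by
  induction cs generalizing d c with
  | nil => exact hd
  | cons x xs ih =>
    refine ih _ _ ?_ (by omega)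
    intro k v hkv
    rw [PySem.Dict.get?_insert] at hkv
    split at hkv
    · obtain rfl := Option.some.inj hkv; exact hc
    · exact hd k v hkv

theorem buildD_nonneg (base : String) :
    ∀ k v, (pvBuildD base).get? k = some v → 0 ≤ v := by
  unfold pvBuildD
  exact buildD_nonneg_aux base.toList PySem.Dict.empty 0
    (by intro k v h; simp [PySem.Dict.get?_empty] at h) le_rfl

-- A's scan, expressed on the filtered index list
def pvGoI : List Int → Int → Bool
  | [], _ => true
  | v :: rest, cur => if v < cur then false else pvGoI rest v

theorem scanA_eq_goI (d : PySem.Dict String Int) (arr : List String) (cur : Int) :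
    pvScanA d arr cur = pvGoI (arr.filterMap (fun m => d.get? m)) cur := by
  induction arr generalizing cur with
  | nil => rfl
  | cons m rest ih =>
    simp only [pvScanA, List.filterMap_cons]
    cases h : d.get? m with
    | none => simp [ih]
    | some v =>
      simp only [pvGoI]
      split
      · rfl
      · exact ih v

theorem goI_iff (l : List Int) (cur : Int) :
    pvGoI l cur = true ↔ List.IsChain (· ≤ ·) (cur :: l) := by
  induction l generalizing cur with
  | nil => simp [pvGoI]
  | cons v rest ih =>
    rw [pvGoI, List.isChain_cons_cons, ← ih]
    by_cases hvc : v < cur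
    · rw [if_pos hvc]
      constructor
      · intro h; exact absurd h (by simp)
      · rintro ⟨h1, _⟩; omega
    · rw [if_neg hvc]
      constructor
      · intro h; exact ⟨by omega, h⟩
      · rintro ⟨_, h⟩; exact h

-- ===== VERDICT (by name: the statement is the Claim_ definition above) =====
theorem checkOrder_spec : Claim_equal_checkOrder := by
  intro base arr _
  unfold Spec_checkOrder checkOrder checkOrder_alt
  rw [buildDAlt_eq]
  set d := pvBuildD base with hd
  set l := arr.filterMap (fun m => d.get? m) with hl
  have hnn : ∀ x ∈ l, (0 : Int) ≤ x := by
    intro x hx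
    rw [hl, List.mem_filterMap] at hx
    rcases hx with ⟨m, _, hm⟩
    exact buildD_nonneg base m x hm
  rw [Bool.eq_iff_iff, scanA_eq_goI, ← hl, goI_iff, beq_iff_eq, List.isChain_iff_pairwise,
    List.pairwise_cons]
  constructor
  · rintro ⟨-, hp⟩
    exact (PySem.List.sorted_eq_self_of_pairwise l (fun x => x) hp).symm
  · intro hs
    have hp : l.Pairwise (· ≤ ·) := by
      have := PySem.List.sorted_pairwise l (fun x => x)
      rw [← hs] at this
      exact this
    exact ⟨hnn, hp⟩
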